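-- pv_equiv track=rewrite | github.com/nassuphis/specparser | src/specparser/chain.py | split_chain
-- ===== SOURCE A (Python) =====
-- SKIP_PREFIXES = {"!"}
--
-- def _is_skipped_name(raw: str) -> bool:
--     """Check if name should be skipped (starts with !)."""
--     s = raw.lstrip()
--     return bool(s) and s[0] in SKIP_PREFIXES
--
-- def _strip_nonfunctional_prefix(raw: str) -> str:
--     """Remove leading underscore (variant marker)."""
--     s = raw.lstrip()
--     return s[1:] if s.startswith("_") else raw
--
-- def split_top_level(s: str, sep: str) -> list[str]:
--     """
--     Split string on separator, but only at top level (outside brackets).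
--
--     Handles (), [], {} nesting.
--     """
--     out, buf, depth = [], [], 0
--     opens = "([{"
--     closes = ")]}"
--     for ch in s:
--         if ch in opens:
--             depth += 1
--         elif ch in closes:
--             if depth > 0:
--                 depth -= 1
--         if ch == sep and depth == 0:
--             out.append("".join(buf).strip())
--             buf = []
--         else:
--             buf.append(ch)
--     if buf:
--         out.append("".join(buf).strip())
--     return [x for x in out if x != ""]
--
-- def split_chain(chain: str) -> dict[str, list[str]]:
--     """
--     Split a chain into a dict mapping operation names to raw argument lists.
--
--     Args:
--         chain: Chain string like "op1:arg1:arg2,op2:arg1"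
--
--     Returns:
--         Dict like {"op1": ["arg1", "arg2"], "op2": ["arg1"]}
--     """
--     out = {}
--     if not chain.strip():
--         return out
--     items = split_top_level(chain, ",")
--     for item in items:
--         parts = split_top_level(item, ":")
--         if not parts:
--             continue
--         name_raw = parts[0].strip()
--         if _is_skipped_name(name_raw):
--             continue
--         name = _strip_nonfunctional_prefix(name_raw)
--         name = name.lower()
--         out[name] = parts[1:]
--     return out
-- ===== SOURCE B (Python) =====
-- def split_chain(chain):
--     """One-pass parse: bracket depth + token buffer + per-op parts, no two-level re-splitting."""
--     out = {}
--     parts = []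
--     buf = []
--     depth = 0
--
--     def flush_token():
--         nonlocal buf
--         tok = "".join(buf).strip()
--         buf = []
--         if tok:
--             parts.append(tok)
--
--     def flush_op():
--         nonlocal parts
--         flush_token()
--         if parts:
--             name = parts[0]
--             if not name.startswith("!"):
--                 if name.startswith("_"):
--                     name = name[1:]
--                 out[name.lower()] = parts[1:]
--         parts = []
--
--     for ch in chain:
--         if ch in "([{":
--             depth += 1
--         elif ch in ")]}":
--             if depth > 0:
--                 depth -= 1
--         if depth == 0 and ch == ",":
--             flush_op()
--         elif depth == 0 and ch == ":":
--             flush_token()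
--         else:
--             buf.append(ch)
--     flush_op()
--     return out
-- ===== Notes on version B (the rewrite author's own statement) =====
-- stated objective: alternative
-- what changed: B parses the chain in a single pass over the characters, maintaining bracket depth, a token buffer and the current op's parts, instead of A's two-level split: split the whole string on top-level commas, then re-split each item on top-level colons.
import Mathlib
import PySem

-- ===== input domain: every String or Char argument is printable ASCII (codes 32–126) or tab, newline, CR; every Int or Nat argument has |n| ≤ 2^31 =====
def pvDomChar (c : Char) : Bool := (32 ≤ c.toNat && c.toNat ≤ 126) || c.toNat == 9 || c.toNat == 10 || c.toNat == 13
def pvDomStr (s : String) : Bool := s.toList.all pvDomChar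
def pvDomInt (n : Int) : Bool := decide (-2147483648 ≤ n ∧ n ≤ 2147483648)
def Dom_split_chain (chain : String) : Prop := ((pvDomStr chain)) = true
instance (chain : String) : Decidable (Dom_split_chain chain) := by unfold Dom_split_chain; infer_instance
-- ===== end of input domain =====

-- B re-parses the chain in ONE pass over the characters (bracket depth + token buffer + per-op parts)
-- instead of A's two-level split-then-resplit; objective: alternative single-pass decomposition.


-- ===== PORT A =====
-- opens = "([{", closes = ")]}" and the shared depth-update lines of the loop bodies
def pvOpens : List Char := ['(', '[', '{']
def pvCloses : List Char := [')', ']', '}']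
def pvBump (depth : Nat) (ch : Char) : Nat :=
  if ch ∈ pvOpens then depth + 1
  else if ch ∈ pvCloses then (if depth > 0 then depth - 1 else depth) else depth

-- loop body of split_top_level: state (out, buf, depth)
def pvStlStep (sep : Char) (st : List String × List Char × Nat) (ch : Char) :
    List String × List Char × Nat :=
  let d := pvBump st.2.2 ch
  if ch = sep ∧ d = 0 then (st.1 ++ [String.ofList (PySem.Chars.strip st.2.1)], [], d)
  else (st.1, st.2.1 ++ [ch], d)

def split_top_level (s : String) (sep : Char) : List String :=
  let r := s.toList.foldl (pvStlStep sep) ([], [], 0)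
  let out := if r.2.1 ≠ [] then r.1 ++ [String.ofList (PySem.Chars.strip r.2.1)] else r.1
  out.filter (fun x => x ≠ "")

def pvSkipPrefixes : List Char := ['!']

def pv_is_skipped_name (raw : String) : Bool :=
  match PySem.Chars.lstrip raw.toList with     -- s = raw.lstrip(); bool(s) and s[0] in SKIP_PREFIXES
  | [] => false
  | c :: _ => c ∈ pvSkipPrefixes

def pv_strip_nonfunctional_prefix (raw : String) : String :=
  let s := PySem.Chars.lstrip raw.toList
  if PySem.Chars.startswith s ['_'] then String.ofList (s.drop 1) else raw   -- s[1:] (exact: drop 1)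

-- tail of split_chain's loop body, after parts = split_top_level(item, ":")
def pvAFinish (out : PySem.Dict String (List String)) (parts : List String) :
    PySem.Dict String (List String) :=
  match parts with
  | [] => out
  | p0 :: rest =>
    let name_raw := PySem.Str.strip p0
    if pv_is_skipped_name name_raw then out
    else
      let name := PySem.Str.lower (pv_strip_nonfunctional_prefix name_raw)
      out.insert name rest

-- loop body of split_chain's for-loop over items
def pvProcessItem (out : PySem.Dict String (List String)) (item : String) :
    PySem.Dict String (List String) :=
  pvAFinish out (split_top_level item ':')

def split_chain (chain : String) : List (String × List String) :=
  if PySem.Str.strip chain = "" then (PySem.Dict.mk ([] : List (String × List String))).items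
  else ((split_top_level chain ',').foldl pvProcessItem (PySem.Dict.mk [])).items

-- ===== PORT B =====
-- flush_token: strip the buffer, keep it as a part if nonempty
def pvFlushToken (parts : List String) (buf : List Char) : List String :=
  let tok := PySem.Chars.strip buf
  if tok ≠ [] then parts ++ [String.ofList tok] else parts

-- tail of flush_op after the token flush: name handling + store
def pvOpFinish (out : PySem.Dict String (List String)) (parts : List String) :
    PySem.Dict String (List String) :=
  match parts with
  | [] => out
  | name :: rest =>
    if PySem.Str.startswith name "!" then out
    else
      let name := if PySem.Str.startswith name "_" then String.ofList (name.toList.drop 1) else name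
      out.insert (PySem.Str.lower name) rest

def pvFlushOp (out : PySem.Dict String (List String)) (parts : List String) (buf : List Char) :
    PySem.Dict String (List String) :=
  pvOpFinish out (pvFlushToken parts buf)

-- loop body of B: state (out, parts, buf, depth)
def pvBStep (st : PySem.Dict String (List String) × List String × List Char × Nat) (ch : Char) :
    PySem.Dict String (List String) × List String × List Char × Nat :=
  let d := pvBump st.2.2.2 ch
  if d = 0 ∧ ch = ',' then (pvFlushOp st.1 st.2.1 st.2.2.1, [], [], 0)
  else if d = 0 ∧ ch = ':' then (st.1, pvFlushToken st.2.1 st.2.2.1, [], 0)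
  else (st.1, st.2.1, st.2.2.1 ++ [ch], d)

def split_chain_alt (chain : String) : List (String × List String) :=
  let r := chain.toList.foldl pvBStep (PySem.Dict.mk [], [], [], 0)
  (pvFlushOp r.1 r.2.1 r.2.2.1).items

-- ===== PRECONDITION & SPEC =====
def Spec_split_chain (chain : String) (out : List (String × List String)) : Prop := out = split_chain_alt chain
instance (chain : String) (out : List (String × List String)) : Decidable (Spec_split_chain chain out) := by unfold Spec_split_chain; infer_instance

-- ===== CLAIM (what is proved, stated in full; the proofs are below) =====
def Claim_equal_split_chain : Prop := ∀ (chain : String), Dom_split_chain chain → Spec_split_chain chain (split_chain chain)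

-- ===== LEMMAS AND PROOFS =====

-- whitespace predicate and basic strip facts
def pvWS (c : Char) : Bool := PySem.Chars.isspace c

theorem pv_strip_cons_ws {w : Char} (h : pvWS w = true) (l : List Char) :
    PySem.Chars.strip (w :: l) = PySem.Chars.strip l := by
  simp [PySem.Chars.strip, PySem.Chars.lstrip, List.dropWhile_cons, pvWS] at h ⊢
  simp [h]

theorem pv_rstrip_concat_ws {w : Char} (h : pvWS w = true) (l : List Char) :
    PySem.Chars.rstrip (l ++ [w]) = PySem.Chars.rstrip l := by
  have : PySem.Chars.rstrip (l ++ [w]) = List.rdropWhile PySem.Chars.isspace (l ++ [w]) := rfl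
  rw [this, List.rdropWhile_concat_pos PySem.Chars.isspace l w h]; rfl

theorem pv_strip_concat_ws {w : Char} (h : pvWS w = true) (l : List Char) :
    PySem.Chars.strip (l ++ [w]) = PySem.Chars.strip l := by
  show PySem.Chars.rstrip (PySem.Chars.lstrip (l ++ [w])) = _
  have hl : PySem.Chars.lstrip (l ++ [w]) =
      if (PySem.Chars.lstrip l).isEmpty then PySem.Chars.lstrip [w] else PySem.Chars.lstrip l ++ [w] := by
    simp [PySem.Chars.lstrip, List.dropWhile_append]
  by_cases he : (PySem.Chars.lstrip l).isEmpty
  · rw [hl, if_pos he]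
    have : PySem.Chars.lstrip [w] = [] := by
      simp [PySem.Chars.lstrip, List.dropWhile_cons, pvWS] at h ⊢; simp [h]
    rw [this]
    show PySem.Chars.rstrip [] = PySem.Chars.strip l
    have : PySem.Chars.lstrip l = [] := by simpa [List.isEmpty_iff] using he
    show _ = PySem.Chars.rstrip (PySem.Chars.lstrip l)
    rw [this]
  · rw [hl, if_neg he]
    exact pv_rstrip_concat_ws h _

theorem pv_strip_append_ws {u : List Char} (h : ∀ w ∈ u, pvWS w = true) (x : List Char) :
    PySem.Chars.strip (x ++ u) = PySem.Chars.strip x := by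
  induction u generalizing x with
  | nil => simp
  | cons w u ih =>
    have : x ++ (w :: u) = (x ++ [w]) ++ u := by simp
    rw [this, ih (fun a ha => h a (by simp [ha])), pv_strip_concat_ws (h w (by simp)) x]

theorem pv_lstrip_strip (x : List Char) :
    PySem.Chars.lstrip (PySem.Chars.strip x) = PySem.Chars.strip x := by
  set y := List.dropWhile PySem.Chars.isspace x with hy
  show List.dropWhile PySem.Chars.isspace (List.rdropWhile PySem.Chars.isspace y)
      = List.rdropWhile PySem.Chars.isspace y
  have hyd : List.dropWhile PySem.Chars.isspace y = y := List.dropWhile_idempotent _ _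
  rcases List.rdropWhile_prefix PySem.Chars.isspace y with ⟨t, ht⟩
  cases hz : List.rdropWhile PySem.Chars.isspace y with
  | nil => simp
  | cons a z =>
    have ha : PySem.Chars.isspace a = false := by
      have hyz : y = a :: (z ++ t) := by rw [← ht, hz]; simp
      have hyd' := hyd
      rw [hyz, List.dropWhile_cons] at hyd'
      by_contra hc
      simp only [Bool.not_eq_false] at hc
      rw [if_pos hc] at hyd'
      have h1 := congrArg List.length hyd'
      have h2 := List.length_dropWhile_le PySem.Chars.isspace (z ++ t)
      simp at h1 h2
      omega
    simp [ha]

theorem pv_strip_idem (x : List Char) :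
    PySem.Chars.strip (PySem.Chars.strip x) = PySem.Chars.strip x := by
  show PySem.Chars.rstrip (PySem.Chars.lstrip (PySem.Chars.strip x)) = _
  rw [pv_lstrip_strip]
  show List.rdropWhile _ (List.rdropWhile _ _) = _
  exact List.rdropWhile_idempotent _ _

theorem pv_strip_eq_nil_all_ws {l : List Char} (h : PySem.Chars.strip l = []) :
    ∀ w ∈ l, pvWS w = true := by
  have h2 : ∀ w ∈ List.dropWhile PySem.Chars.isspace l, PySem.Chars.isspace w = true :=
    List.rdropWhile_eq_nil_iff.mp h
  intro w hw
  rw [← List.takeWhile_append_dropWhile (p := PySem.Chars.isspace) (l := l)] at hw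
  rcases List.mem_append.mp hw with h1 | h1
  · exact List.mem_takeWhile_imp h1
  · exact h2 w h1


theorem pvWS_not_special {w : Char} (h : pvWS w = true) :
    (∀ d, pvBump d w = d) ∧ w ≠ ',' ∧ w ≠ ':' := by
  have hne : ∀ c0 : Char, pvWS c0 = false → w ≠ c0 := by
    intro c0 hc e; rw [e, hc] at h; cases h
  refine ⟨fun d => ?_, hne ',' (by decide), hne ':' (by decide)⟩
  have h1 : w ∉ pvOpens := by
    intro hm; fin_cases hm <;> simp_all <;> cases h
  have h2 : w ∉ pvCloses := by
    intro hm; fin_cases hm <;> simp_all <;> cases h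
  simp [pvBump, h1, h2]

-- raw top-level splitter: (first chunk, later chunks)
def pvRS (sep : Char) : List Char → Nat → List Char × List (List Char)
  | [], _ => ([], [])
  | ch :: t, d =>
    let d' := pvBump d ch
    let r := pvRS sep t d'
    if ch = sep ∧ d' = 0 then ([], r.1 :: r.2)
    else (ch :: r.1, r.2)

def pvMkStrip (c : List Char) : String := String.ofList (PySem.Chars.strip c)

def pvFiltNE (l : List String) : List String := l.filter (fun x => x ≠ "")

-- the stripped nonempty pieces of buf ++ t split by sep at top level, starting at depth d
def pvPieces (sep : Char) (buf t : List Char) (d : Nat) : List String :=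
  pvFiltNE (pvMkStrip (buf ++ (pvRS sep t d).1) :: (pvRS sep t d).2.map pvMkStrip)

theorem pvMkStrip_eq_empty_iff (c : List Char) : pvMkStrip c = "" ↔ PySem.Chars.strip c = [] := by
  unfold pvMkStrip
  constructor
  · intro h
    have := congrArg String.toList h
    simpa using this
  · intro h; rw [h]

theorem pvPieces_split (sep : Char) (buf t : List Char) (d : Nat) (c : List Char) (cs : List (List Char))
    (h : pvRS sep t d = (c, cs)) :
    pvPieces sep buf t d = pvFiltNE [pvMkStrip (buf ++ c)] ++ pvFiltNE (cs.map pvMkStrip) := by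
  simp only [pvPieces, h, pvFiltNE, List.filter_cons]
  split_ifs <;> simp

-- all-whitespace input: no splits at all
theorem pvRS_all_ws {sep : Char} (hsep : sep = ',' ∨ sep = ':') {u : List Char} (h : ∀ w ∈ u, pvWS w = true) (d : Nat) :
    pvRS sep u d = (u, []) := by
  induction u generalizing d with
  | nil => rfl
  | cons w u ih =>
    have hw := pvWS_not_special (h w (by simp))
    have hsep' : ¬(w = sep ∧ d = 0) := by
      rcases hsep with rfl | rfl
      · exact fun hc => hw.2.1 hc.1
      · exact fun hc => hw.2.2 hc.1
    simp only [pvRS, hw.1, if_neg hsep', ih (fun a ha => h a (by simp [ha]))]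

-- finalizer of A's split_top_level loop
def pvFinA (r : List String × List Char × Nat) : List String :=
  if r.2.1 ≠ [] then r.1 ++ [String.ofList (PySem.Chars.strip r.2.1)] else r.1

-- A's split_top_level fold equals the pieces of the raw splitter
theorem pvStl_fold (sep : Char) (t : List Char) (out : List String) (buf : List Char) (d : Nat) :
    pvFiltNE (pvFinA (t.foldl (pvStlStep sep) (out, buf, d)))
    = pvFiltNE out ++ pvPieces sep buf t d := by
  induction t generalizing out buf d with
  | nil =>
    rw [pvPieces_split sep buf [] d [] [] rfl]
    by_cases hbuf : buf = ([] : List Char)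
    · subst hbuf
      have hs : PySem.Chars.strip ([] : List Char) = [] := rfl
      simp [pvFinA, pvFiltNE, pvMkStrip, hs]
    · simp [pvFinA, hbuf, pvFiltNE, List.filter_append, pvMkStrip]
  | cons ch t ih =>
    by_cases hc : ch = sep ∧ pvBump d ch = 0
    · obtain ⟨rfl, h0⟩ := hc
      have hstep : pvStlStep ch (out, buf, d) ch =
          (out ++ [String.ofList (PySem.Chars.strip buf)], [], pvBump d ch) := by
        simp [pvStlStep, h0]
      obtain ⟨c, cs, hr⟩ : ∃ c cs, pvRS ch t (pvBump d ch) = (c, cs) := ⟨_, _, rfl⟩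
      have hr0 : pvRS ch t 0 = (c, cs) := h0 ▸ hr
      have hrs : pvRS ch (ch :: t) d = ([], c :: cs) := by simp [pvRS, h0, hr0]
      rw [List.foldl_cons, hstep, ih,
        pvPieces_split ch buf (ch :: t) d [] (c :: cs) hrs,
        pvPieces_split ch [] t (pvBump d ch) c cs hr]
      simp only [pvFiltNE, List.filter_append, List.filter_cons, List.nil_append,
        List.map_cons, List.append_nil]
      split_ifs <;> simp_all [pvMkStrip]
    · have hstep : pvStlStep sep (out, buf, d) ch = (out, buf ++ [ch], pvBump d ch) := by
        simp only [pvStlStep]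
        rw [if_neg hc]
      obtain ⟨c, cs, hr⟩ : ∃ c cs, pvRS sep t (pvBump d ch) = (c, cs) := ⟨_, _, rfl⟩
      have hrs : pvRS sep (ch :: t) d = (ch :: c, cs) := by
        simp only [pvRS, hr]
        rw [if_neg hc]
      rw [List.foldl_cons, hstep, ih,
        pvPieces_split sep buf (ch :: t) d (ch :: c) cs hrs,
        pvPieces_split sep (buf ++ [ch]) t (pvBump d ch) c cs hr,
        show buf ++ ch :: c = (buf ++ [ch]) ++ c by simp]

theorem pvStl_eq (s : String) (sep : Char) :
    split_top_level s sep = pvPieces sep [] s.toList 0 := by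
  have h := pvStl_fold sep s.toList [] [] 0
  simpa [split_top_level, pvFinA, pvFiltNE] using h

-- one cons step of the raw splitter, at piece level
theorem pvPieces_cons_pos {sep ch : Char} {d : Nat} (hch : ch = sep) (h0 : pvBump d ch = 0)
    (buf t : List Char) :
    pvPieces sep buf (ch :: t) d = pvFiltNE [pvMkStrip buf] ++ pvPieces sep [] t 0 := by
  subst hch
  obtain ⟨c, cs, hr0⟩ : ∃ c cs, pvRS ch t 0 = (c, cs) := ⟨_, _, rfl⟩
  have hrs : pvRS ch (ch :: t) d = ([], c :: cs) := by simp [pvRS, h0, hr0]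
  rw [pvPieces_split ch buf (ch :: t) d [] (c :: cs) hrs,
    pvPieces_split ch [] t 0 c cs hr0]
  simp [pvFiltNE, List.filter_cons]
  split_ifs <;> simp

theorem pvPieces_cons_neg {sep ch : Char} {d : Nat} (h : ¬(ch = sep ∧ pvBump d ch = 0))
    (buf t : List Char) :
    pvPieces sep buf (ch :: t) d = pvPieces sep (buf ++ [ch]) t (pvBump d ch) := by
  obtain ⟨c, cs, hr⟩ : ∃ c cs, pvRS sep t (pvBump d ch) = (c, cs) := ⟨_, _, rfl⟩
  have hrs : pvRS sep (ch :: t) d = (ch :: c, cs) := by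
    simp only [pvRS, hr]
    rw [if_neg h]
  rw [pvPieces_split sep buf (ch :: t) d (ch :: c) cs hrs,
    pvPieces_split sep (buf ++ [ch]) t (pvBump d ch) c cs hr,
    show buf ++ ch :: c = (buf ++ [ch]) ++ c by simp]

-- leading whitespace does not change the pieces (depth 0)
theorem pvPieces_lstrip {sep : Char} (hsep : sep = ',' ∨ sep = ':') (c : List Char) :
    pvPieces sep [] (List.dropWhile pvWS c) 0 = pvPieces sep [] c 0 := by
  induction c with
  | nil => rfl
  | cons w c ih =>
    by_cases hw : pvWS w = true
    · have hnw := pvWS_not_special hw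
      have hns : ¬(w = sep ∧ pvBump 0 w = 0) := by
        rcases hsep with rfl | rfl
        · exact fun hc => hnw.2.1 hc.1
        · exact fun hc => hnw.2.2 hc.1
      rw [List.dropWhile_cons, if_pos hw, ih, pvPieces_cons_neg hns [] c, hnw.1 0]
      simp only [List.nil_append]
      obtain ⟨c', cs', hr⟩ : ∃ c' cs', pvRS sep c 0 = (c', cs') := ⟨_, _, rfl⟩
      rw [pvPieces_split sep [] c 0 c' cs' hr, pvPieces_split sep [w] c 0 c' cs' hr]
      have : pvMkStrip ([w] ++ c') = pvMkStrip ([] ++ c') := by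
        simp [pvMkStrip, pv_strip_cons_ws hw]
      rw [this]
    · rw [List.dropWhile_cons, if_neg hw]

-- trailing whitespace does not change the pieces
theorem pvPieces_append_ws {sep : Char} (hsep : sep = ',' ∨ sep = ':') {u : List Char}
    (hu : ∀ w ∈ u, pvWS w = true) (t : List Char) :
    ∀ (buf : List Char) (d : Nat), pvPieces sep buf (t ++ u) d = pvPieces sep buf t d := by
  induction t with
  | nil =>
    intro buf d
    rw [List.nil_append, pvPieces_split sep buf [] d [] [] rfl,
      pvPieces_split sep buf u d u [] (pvRS_all_ws hsep hu d)]
    have : pvMkStrip (buf ++ u) = pvMkStrip (buf ++ []) := by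
      simp [pvMkStrip, pv_strip_append_ws hu]
    rw [this]
  | cons ch t ih =>
    intro buf d
    by_cases hc : ch = sep ∧ pvBump d ch = 0
    · rw [List.cons_append, pvPieces_cons_pos hc.1 hc.2, pvPieces_cons_pos hc.1 hc.2, ih]
    · rw [List.cons_append, pvPieces_cons_neg hc, pvPieces_cons_neg hc, ih]

-- stripping an item does not change its pieces
theorem pvPieces_strip {sep : Char} (hsep : sep = ',' ∨ sep = ':') (c : List Char) :
    pvPieces sep [] (PySem.Chars.strip c) 0 = pvPieces sep [] c 0 := by
  have h1 : PySem.Chars.lstrip c = List.dropWhile pvWS c := rfl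
  have h2 : PySem.Chars.strip c
      = List.rdropWhile pvWS (List.dropWhile pvWS c) := rfl
  set y := List.dropWhile pvWS c with hy
  have hsplit : List.rdropWhile pvWS y ++ List.rtakeWhile pvWS y = y :=
    List.rdropWhile_append_rtakeWhile
  have hws : ∀ w ∈ List.rtakeWhile pvWS y, pvWS w = true :=
    fun w hw => List.mem_rtakeWhile_imp hw
  calc pvPieces sep [] (PySem.Chars.strip c) 0
      = pvPieces sep [] (List.rdropWhile pvWS y ++ List.rtakeWhile pvWS y) 0 := by
        rw [h2, pvPieces_append_ws hsep hws]
    _ = pvPieces sep [] y 0 := by rw [hsplit]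
    _ = pvPieces sep [] c 0 := pvPieces_lstrip hsep c

-- B's inner (colon-level) step
def pvIStep (st : List String × List Char × Nat) (ch : Char) : List String × List Char × Nat :=
  let d := pvBump st.2.2 ch
  if d = 0 ∧ ch = ':' then (pvFlushToken st.1 st.2.1, [], 0)
  else (st.1, st.2.1 ++ [ch], d)

theorem pvBStep_eq (out : PySem.Dict String (List String)) (parts : List String)
    (buf : List Char) (d : Nat) (ch : Char) :
    pvBStep (out, parts, buf, d) ch =
      if pvBump d ch = 0 ∧ ch = ',' then (pvFlushOp out parts buf, [], [], 0)
      else (out, pvIStep (parts, buf, d) ch) := by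
  simp only [pvBStep, pvIStep]
  split_ifs <;> rfl

theorem pvFlushToken_eq (parts : List String) (buf : List Char) :
    pvFlushToken parts buf = parts ++ pvFiltNE [pvMkStrip buf] := by
  simp only [pvFlushToken, pvFiltNE, pvMkStrip, List.filter_cons]
  by_cases h : PySem.Chars.strip buf = []
  · simp [h]
  · have : String.ofList (PySem.Chars.strip buf) ≠ "" :=
      fun e => h ((pvMkStrip_eq_empty_iff buf).mp e)
    simp [h, this]

-- B's token-level fold computes the colon pieces
theorem pvIFold (t : List Char) (parts : List String) (buf : List Char) (d : Nat) :
    (let r := t.foldl pvIStep (parts, buf, d); pvFlushToken r.1 r.2.1)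
      = parts ++ pvPieces ':' buf t d := by
  induction t generalizing parts buf d with
  | nil =>
    rw [pvPieces_split ':' buf [] d [] [] rfl]
    simpa [pvFiltNE] using pvFlushToken_eq parts buf
  | cons ch t ih =>
    by_cases hc : pvBump d ch = 0 ∧ ch = ':'
    · obtain ⟨h0, rfl⟩ := hc
      have hstep : pvIStep (parts, buf, d) ':' = (pvFlushToken parts buf, [], 0) := by
        simp [pvIStep, h0]
      rw [List.foldl_cons, hstep, ih, pvPieces_cons_pos rfl h0, pvFlushToken_eq]
      simp
    · have hstep : pvIStep (parts, buf, d) ch = (parts, buf ++ [ch], pvBump d ch) := by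
        simp only [pvIStep]
        rw [if_neg hc]
      have hc' : ¬(ch = ':' ∧ pvBump d ch = 0) := fun h => hc ⟨h.2, h.1⟩
      rw [List.foldl_cons, hstep, ih, pvPieces_cons_neg hc']

-- processing one comma chunk, starting from an inner state
def pvPChunkFrom (out : PySem.Dict String (List String)) (parts : List String) (buf : List Char)
    (d : Nat) (c : List Char) : PySem.Dict String (List String) :=
  let r := c.foldl pvIStep (parts, buf, d)
  pvFlushOp out r.1 r.2.1

def pvPChunk (out : PySem.Dict String (List String)) (c : List Char) :
    PySem.Dict String (List String) := pvPChunkFrom out [] [] 0 c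

-- the inner step keeps the depth equal to the bumped depth
theorem pvIStep_shape (parts : List String) (buf : List Char) (d : Nat) (ch : Char) :
    ∃ p b, pvIStep (parts, buf, d) ch = (p, b, pvBump d ch) := by
  by_cases hc : pvBump d ch = 0 ∧ ch = ':'
  · obtain ⟨h0, rfl⟩ := hc
    exact ⟨pvFlushToken parts buf, [], by simp [pvIStep, h0]⟩
  · exact ⟨parts, buf ++ [ch], by simp only [pvIStep]; rw [if_neg hc]⟩

-- B's outer fold processes the comma chunks one by one
theorem pvBFold (t : List Char) (out : PySem.Dict String (List String)) (parts : List String)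
    (buf : List Char) (d : Nat) :
    (let r := t.foldl pvBStep (out, parts, buf, d); pvFlushOp r.1 r.2.1 r.2.2.1)
      = (pvRS ',' t d).2.foldl pvPChunk (pvPChunkFrom out parts buf d (pvRS ',' t d).1) := by
  induction t generalizing out parts buf d with
  | nil => rfl
  | cons ch t ih =>
    by_cases hc : pvBump d ch = 0 ∧ ch = ','
    · obtain ⟨h0, rfl⟩ : pvBump d ch = 0 ∧ ch = ',' := hc
      have hstep : pvBStep (out, parts, buf, d) ',' = (pvFlushOp out parts buf, [], [], 0) := by
        rw [pvBStep_eq, if_pos ⟨h0, rfl⟩]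
      obtain ⟨c, cs, hr0⟩ : ∃ c cs, pvRS ',' t 0 = (c, cs) := ⟨_, _, rfl⟩
      have hrs : pvRS ',' (',' :: t) d = ([], c :: cs) := by
        simp [pvRS, h0, hr0]
      rw [List.foldl_cons, hstep, ih, hrs, hr0]
      rfl
    · have hc' : ¬(ch = ',' ∧ pvBump d ch = 0) := fun h => hc ⟨h.2, h.1⟩
      obtain ⟨p', b', hs⟩ := pvIStep_shape parts buf d ch
      have hstep : pvBStep (out, parts, buf, d) ch = (out, p', b', pvBump d ch) := by
        rw [pvBStep_eq, if_neg hc, hs]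
      obtain ⟨c, cs, hr⟩ : ∃ c cs, pvRS ',' t (pvBump d ch) = (c, cs) := ⟨_, _, rfl⟩
      have hrs : pvRS ',' (ch :: t) d = (ch :: c, cs) := by
        simp only [pvRS, hr]
        rw [if_neg hc']
      rw [List.foldl_cons, hstep, ih, hrs, hr]
      have : pvPChunkFrom out parts buf d (ch :: c) = pvPChunkFrom out p' b' (pvBump d ch) c := by
        simp only [pvPChunkFrom, List.foldl_cons, hs]
      rw [this]

-- per-chunk agreement with A's per-item processing
theorem pvPChunk_eq (out : PySem.Dict String (List String)) (c : List Char) :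
    pvPChunk out c = pvProcessItem out (pvMkStrip c) := by
  have hL : pvPChunk out c = pvOpFinish out (pvPieces ':' [] c 0) := by
    have h := pvIFold c [] [] 0
    simp only [List.nil_append] at h
    simp only [pvPChunk, pvPChunkFrom, pvFlushOp]
    rw [h]
  have hparts : split_top_level (pvMkStrip c) ':' = pvPieces ':' [] c 0 := by
    rw [pvStl_eq]
    have : (pvMkStrip c).toList = PySem.Chars.strip c := by simp [pvMkStrip]
    rw [this, pvPieces_strip (Or.inr rfl)]
  rw [hL]
  show pvOpFinish out (pvPieces ':' [] c 0) = pvAFinish out (split_top_level (pvMkStrip c) ':')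
  rw [hparts]
  cases hp : pvPieces ':' [] c 0 with
  | nil => rfl
  | cons p0 rest =>
    -- p0 is a stripped nonempty string
    have hmem : p0 ∈ pvPieces ':' [] c 0 := by rw [hp]; exact List.mem_cons_self
    have hne : p0 ≠ "" ∧ ∃ x, p0 = pvMkStrip x := by
      unfold pvPieces pvFiltNE at hmem
      have h1 := List.of_mem_filter hmem
      have h2 := List.mem_of_mem_filter hmem
      refine ⟨by simpa using h1, ?_⟩
      rcases List.mem_cons.mp h2 with h3 | h3
      · exact ⟨_, h3⟩
      · rcases List.mem_map.mp h3 with ⟨x, _, hx⟩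
        exact ⟨x, hx.symm⟩
    obtain ⟨hne0, x, rfl⟩ := hne
    have htl : (pvMkStrip x).toList = PySem.Chars.strip x := by simp [pvMkStrip]
    have hstr : PySem.Str.strip (pvMkStrip x) = pvMkStrip x := by
      show String.ofList (PySem.Chars.strip (pvMkStrip x).toList) = pvMkStrip x
      rw [htl, pv_strip_idem]
      rfl
    have hls : PySem.Chars.lstrip (pvMkStrip x).toList = (pvMkStrip x).toList := by
      rw [htl, pv_lstrip_strip]
    simp only [pvAFinish, pvOpFinish, hstr]
    cases hx : (pvMkStrip x).toList with
    | nil =>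
      exfalso
      apply hne0
      have h4 : pvMkStrip x = String.ofList (pvMkStrip x).toList := by simp
      rw [h4, hx]
    | cons a y =>
      rw [hx] at hls
      have hbang : ("!" : String).toList = ['!'] := rfl
      have hund : ("_" : String).toList = ['_'] := rfl
      have hskip : pv_is_skipped_name (pvMkStrip x) = PySem.Str.startswith (pvMkStrip x) "!" := by
        simp only [pv_is_skipped_name, hx, hls, PySem.Str.startswith, PySem.Chars.startswith, hbang]
        by_cases ha : a = '!'
        · subst ha; simp [pvSkipPrefixes, List.isPrefixOf]
        · simp [pvSkipPrefixes, List.isPrefixOf, ha]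
          exact fun h => ha h.symm
      have hpre : pv_strip_nonfunctional_prefix (pvMkStrip x)
          = (if PySem.Str.startswith (pvMkStrip x) "_"
             then String.ofList ((pvMkStrip x).toList.drop 1) else pvMkStrip x) := by
        simp only [pv_strip_nonfunctional_prefix]
        rw [show PySem.Chars.lstrip (pvMkStrip x).toList = (pvMkStrip x).toList from hx ▸ hls]
        have h5 : PySem.Chars.startswith (pvMkStrip x).toList ['_']
            = PySem.Str.startswith (pvMkStrip x) "_" := by
          simp only [PySem.Str.startswith, hund]
        rw [h5]
      rw [hskip, hpre, hx]

theorem pvProcessItem_empty (d : PySem.Dict String (List String)) :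
    pvProcessItem d "" = d := rfl

theorem pvFoldl_filter (l : List String) : ∀ (d : PySem.Dict String (List String)),
    (pvFiltNE l).foldl pvProcessItem d = l.foldl pvProcessItem d := by
  induction l with
  | nil => intro d; rfl
  | cons x l ih =>
    intro d
    by_cases hx : x = ""
    · subst hx
      have h1 : pvFiltNE ("" :: l) = pvFiltNE l := by simp [pvFiltNE]
      rw [h1, ih, List.foldl_cons, pvProcessItem_empty]
    · have h1 : pvFiltNE (x :: l) = x :: pvFiltNE l := by simp [pvFiltNE, hx]
      rw [h1, List.foldl_cons, List.foldl_cons, ih]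

-- ===== VERDICT (by name: the statement is the Claim_ definition above) =====
theorem split_chain_spec : Claim_equal_split_chain := by
  intro chain _
  show split_chain chain = split_chain_alt chain
  obtain ⟨c0, cs, hr⟩ : ∃ c0 cs, pvRS ',' chain.toList 0 = (c0, cs) := ⟨_, _, rfl⟩
  have hB : split_chain_alt chain
      = (List.foldl pvProcessItem (PySem.Dict.mk []) ((c0 :: cs).map pvMkStrip)).items := by
    show (let r := chain.toList.foldl pvBStep (PySem.Dict.mk [], [], [], 0)
          (pvFlushOp r.1 r.2.1 r.2.2.1).items) = _
    rw [show (let r := chain.toList.foldl pvBStep (PySem.Dict.mk [], [], [], 0)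
          (pvFlushOp r.1 r.2.1 r.2.2.1).items)
        = ((let r := chain.toList.foldl pvBStep (PySem.Dict.mk [], [], [], 0)
          pvFlushOp r.1 r.2.1 r.2.2.1)).items from rfl,
      pvBFold]
    simp only [hr]
    have hfun : pvPChunk = fun out c => pvProcessItem out (pvMkStrip c) := by
      funext out c; exact pvPChunk_eq out c
    rw [show pvPChunkFrom (PySem.Dict.mk []) [] [] 0 c0 = pvPChunk (PySem.Dict.mk []) c0 from rfl,
      ← List.foldl_cons, hfun, ← List.foldl_map (f := pvMkStrip) (g := pvProcessItem)]
  by_cases hg : PySem.Str.strip chain = ""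
  · have hnil : PySem.Chars.strip chain.toList = [] := by
      have := congrArg String.toList hg
      simpa [PySem.Str.strip] using this
    have hws : ∀ w ∈ chain.toList, pvWS w = true := pv_strip_eq_nil_all_ws hnil
    have hr' : pvRS ',' chain.toList 0 = (chain.toList, []) := pvRS_all_ws (Or.inl rfl) hws 0
    obtain ⟨rfl, rfl⟩ := Prod.mk.inj (hr.symm.trans hr')
    rw [hB]
    have hmk : pvMkStrip chain.toList = "" := (pvMkStrip_eq_empty_iff _).mpr hnil
    simp only [List.map_cons, List.map_nil, List.foldl_cons, List.foldl_nil, hmk,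
      pvProcessItem_empty]
    simp [split_chain, hg]
  · have hA : split_chain chain
        = ((split_top_level chain ',').foldl pvProcessItem (PySem.Dict.mk [])).items := by
      simp [split_chain, hg]
    rw [hA, pvStl_eq, pvPieces_split ',' [] chain.toList 0 c0 cs hr, hB]
    have : pvFiltNE [pvMkStrip ([] ++ c0)] ++ pvFiltNE (cs.map pvMkStrip)
        = pvFiltNE ((c0 :: cs).map pvMkStrip) := by
      simp [pvFiltNE, List.filter_cons]
      split_ifs <;> simp
    rw [this, pvFoldl_filter]
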